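-- pv_equiv track=rewrite | github.com/IgorGanapolsky/Resume | scripts/scrub_job_captures.py | _strip_script_blocks
-- ===== SOURCE A (Python) =====
-- _REDACT_LABEL = "<!-- [script/app-data removed by scrub_job_captures.py] -->"
--
-- def _strip_script_blocks(text: str) -> tuple[str, int]:
--     """Strip <script>...</script> blocks using a simple scanner (no regex parser)."""
--     lower = text.lower()
--     out: list[str] = []
--     i = 0
--     removed = 0
--     while True:
--         start = lower.find("<script", i)
--         if start == -1:
--             out.append(text[i:])
--             break
--         out.append(text[i:start])
--         end = lower.find("</script>", start)
--         removed += 1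
--         out.append(_REDACT_LABEL)
--         if end == -1:
--             i = len(text)
--             break
--         i = end + len("</script>")
--     return "".join(out), removed
-- ===== SOURCE B (Python) =====
-- _REDACT_LABEL = "<!-- [script/app-data removed by scrub_job_captures.py] -->"
--
--
-- def _strip_script_blocks(text: str) -> tuple[str, int]:
--     """Single left-to-right character scan with an explicit in-script state,
--     instead of repeated find() calls on a lowered copy."""
--     parts: list[str] = []
--     removed = 0
--     skipping = False
--     i, n = 0, len(text)
--     while i < n:
--         if skipping:
--             if text[i:i + 9].lower() == "</script>":
--                 skipping = False
--                 i += 9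
--             else:
--                 i += 1
--         elif text[i:i + 7].lower() == "<script":
--             parts.append(_REDACT_LABEL)
--             removed += 1
--             skipping = True
--             i += 7
--         else:
--             parts.append(text[i])
--             i += 1
--     return "".join(parts), removed
-- ===== Notes on version B (the rewrite author's own statement) =====
-- stated objective: alternative
-- what changed: Replaced the repeated lower()-copy find()-based scanner with a single left-to-right character scan driven by an explicit in-script/outside-script state flag that matches the open/close tags in place.
import Mathlib
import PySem

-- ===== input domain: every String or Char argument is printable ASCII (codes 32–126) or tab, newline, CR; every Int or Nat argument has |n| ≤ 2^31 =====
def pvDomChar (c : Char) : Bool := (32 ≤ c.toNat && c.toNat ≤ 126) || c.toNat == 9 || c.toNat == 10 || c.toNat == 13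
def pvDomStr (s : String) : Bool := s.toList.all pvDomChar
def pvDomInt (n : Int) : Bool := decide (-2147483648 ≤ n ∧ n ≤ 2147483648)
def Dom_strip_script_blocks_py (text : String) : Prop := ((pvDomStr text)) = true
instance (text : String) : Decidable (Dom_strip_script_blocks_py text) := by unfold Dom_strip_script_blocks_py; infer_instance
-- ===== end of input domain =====

-- B replaces A's repeated find() scanning of a lowered copy by a single
-- left-to-right character scan with an explicit in-script state flag (alternative, same cost).

def pvLabel : List Char := "<!-- [script/app-data removed by scrub_job_captures.py] -->".toList
def pvOpen : List Char := "<script".toList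
def pvClose : List Char := "</script>".toList

-- ===== PORT A =====
-- Hand port of Python's `str.find(sub, start)` for a Nat start and the nonempty
-- substrings used here: first index j ≥ i where sub occurs, `none` = -1. Exact there.
def findFromN (hay sub : List Char) (i : Nat) : Option Nat :=
  if h : i + sub.length ≤ hay.length then
    if sub.isPrefixOf (hay.drop i) then some i else findFromN hay sub (i + 1)
  else none
termination_by hay.length + 1 - i
decreasing_by omega

theorem findFromN_some_facts (hay sub : List Char) (i j : Nat)
    (h : findFromN hay sub i = some j) :
    i ≤ j ∧ j + sub.length ≤ hay.length ∧ sub.isPrefixOf (hay.drop j) = true := by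
  fun_induction findFromN hay sub i with
  | case1 i hle hpre =>
      injection h with h; subst h; exact ⟨le_rfl, hle, hpre⟩
  | case2 i hle hpre ih =>
      obtain ⟨h1, h2, h3⟩ := ih h; exact ⟨by omega, h2, h3⟩
  | case3 i hle => exact absurd h (by simp)

def stripAuxA (text low : List Char) (i : Nat) (acc : List Char) (removed : Int) :
    List Char × Int :=
  match hs : findFromN low pvOpen i with
  | none => (acc ++ text.drop i, removed)
  | some s =>
    match he : findFromN low pvClose s with
    | none => ((acc ++ (text.drop i).take (s - i)) ++ pvLabel, removed + 1)
    | some e =>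
        stripAuxA text low (e + 9) ((acc ++ (text.drop i).take (s - i)) ++ pvLabel)
          (removed + 1)
termination_by low.length + 1 - i
decreasing_by
  have h1 := findFromN_some_facts low pvOpen i s hs
  have h2 := findFromN_some_facts low pvClose s e he
  simp only [pvOpen, pvClose] at h1 h2
  simp at h1 h2
  omega

def strip_script_blocks_py (text : String) : String × Int :=
  let l := text.toList
  let low := PySem.Chars.lower l
  let r := stripAuxA l low 0 [] 0
  (String.ofList r.1, r.2)

-- ===== PORT B =====
def altAux (text : List Char) (i : Nat) (skipping : Bool) (acc : List Char)
    (removed : Int) : List Char × Int :=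
  if h : i < text.length then
    if skipping then
      if PySem.Chars.lower ((text.drop i).take 9) = pvClose then
        altAux text (i + 9) false acc removed
      else altAux text (i + 1) true acc removed
    else if PySem.Chars.lower ((text.drop i).take 7) = pvOpen then
      altAux text (i + 7) true (acc ++ pvLabel) (removed + 1)
    else altAux text (i + 1) false (acc ++ (text.drop i).take 1) removed
  else (acc, removed)
termination_by text.length - i
decreasing_by all_goals omega

def strip_script_blocks_py_alt (text : String) : String × Int :=
  let r := altAux text.toList 0 false [] 0
  (String.ofList r.1, r.2)

-- ===== PRECONDITION & SPEC =====
def Spec_strip_script_blocks_py (text : String) (out : String × Int) : Prop := out = strip_script_blocks_py_alt text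
instance (text : String) (out : String × Int) : Decidable (Spec_strip_script_blocks_py text out) := by unfold Spec_strip_script_blocks_py; infer_instance

-- ===== CLAIM (what is proved, stated in full; the proofs are below) =====
def Claim_equal_strip_script_blocks_py : Prop := ∀ (text : String), Dom_strip_script_blocks_py text → Spec_strip_script_blocks_py text (strip_script_blocks_py text)

-- ===== LEMMAS AND PROOFS =====

theorem findFromN_none_facts (hay sub : List Char) (i : Nat)
    (h : findFromN hay sub i = none) :
    ∀ k, i ≤ k → ¬(k + sub.length ≤ hay.length ∧ sub.isPrefixOf (hay.drop k) = true) := by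
  fun_induction findFromN hay sub i with
  | case1 i hle hpre => exact absurd h (by simp)
  | case2 i hle hpre ih =>
      intro k hik
      rcases Nat.eq_or_lt_of_le hik with rfl | hlt
      · rintro ⟨_, hp⟩; exact absurd hp (by simpa using hpre)
      · exact ih h k hlt
  | case3 i hle =>
      intro k hik hm
      exact hle (by omega)

theorem findFromN_min (hay sub : List Char) (i j : Nat)
    (h : findFromN hay sub i = some j) :
    ∀ k, i ≤ k → k < j → ¬(k + sub.length ≤ hay.length ∧ sub.isPrefixOf (hay.drop k) = true) := by
  fun_induction findFromN hay sub i with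
  | case1 i hle hpre =>
      injection h with h; subst h
      intro k h1 h2; omega
  | case2 i hle hpre ih =>
      intro k hik hkj
      rcases Nat.eq_or_lt_of_le hik with rfl | hlt
      · rintro ⟨_, hp⟩; exact absurd hp (by simpa using hpre)
      · exact ih h k hlt hkj
  | case3 i hle => exact absurd h (by simp)

theorem findFromN_of_gt (hay sub : List Char) (i : Nat)
    (h : hay.length < i + sub.length) : findFromN hay sub i = none := by
  rw [findFromN]; simp [Nat.not_le.mpr h]

theorem findFromN_step (hay sub : List Char) (i : Nat)
    (h : ¬(i + sub.length ≤ hay.length ∧ sub.isPrefixOf (hay.drop i) = true)) :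
    findFromN hay sub i = findFromN hay sub (i + 1) := by
  by_cases hle : i + sub.length ≤ hay.length
  · have hpre : ¬ sub.isPrefixOf (hay.drop i) = true := fun hp => h ⟨hle, hp⟩
    rw [findFromN]; simp [hle, hpre]
  · rw [findFromN_of_gt _ _ _ (by omega), findFromN_of_gt _ _ _ (by omega)]

theorem findFromN_none_mono (hay sub : List Char) (i k : Nat)
    (h : findFromN hay sub i = none) (hik : i ≤ k) : findFromN hay sub k = none := by
  obtain ⟨d, rfl⟩ := Nat.exists_eq_add_of_le hik
  clear hik
  induction d generalizing i with
  | zero => simpa using h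
  | succ d ih =>
      have hstep := findFromN_step hay sub i (findFromN_none_facts hay sub i h i le_rfl)
      rw [hstep] at h
      have := ih (i + 1) h
      simpa [Nat.add_assoc, Nat.add_comm, Nat.add_left_comm] using this

-- guard of B <-> the fit-and-prefix predicate over the lowered list
theorem guard_iff (l sub : List Char) (k i : Nat) (hk : sub.length = k)
    (hkpos : 0 < k) :
    ((l.drop i).take k = sub) ↔
      (i + k ≤ l.length ∧ sub.isPrefixOf (l.drop i) = true) := by
  constructor
  · intro he
    have hlen : ((l.drop i).take k).length = sub.length := by rw [he]
    rw [List.length_take, List.length_drop, hk] at hlen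
    refine ⟨by omega, ?_⟩
    rw [List.isPrefixOf_iff_prefix, ← he]
    exact List.take_prefix _ _
  · rintro ⟨hfit, hpre⟩
    rw [List.isPrefixOf_iff_prefix] at hpre
    have := List.prefix_iff_eq_take.mp hpre
    rw [hk] at this; exact this.symm

theorem lower_take_drop (text : List Char) (i k : Nat) :
    PySem.Chars.lower ((text.drop i).take k) =
      ((PySem.Chars.lower text).drop i).take k := by
  simp [PySem.Chars.lower]

theorem length_lower (text : List Char) :
    (PySem.Chars.lower text).length = text.length := by
  simp [PySem.Chars.lower]

-- one unfolding of B at an opening tag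
theorem altAux_open (text : List Char) (j : Nat) (hj : j < text.length)
    (hg : PySem.Chars.lower ((text.drop j).take 7) = pvOpen) (acc : List Char) (r : Int) :
    altAux text j false acc r = altAux text (j + 7) true (acc ++ pvLabel) (r + 1) := by
  rw [altAux]; simp [hj, hg]

-- B in skip mode with no closing tag ahead consumes the rest and emits nothing.
theorem skip_none (text : List Char) (j : Nat)
    (hfind : findFromN (PySem.Chars.lower text) pvClose j = none) (acc : List Char) (r : Int) :
    altAux text j true acc r = (acc, r) := by
  by_cases hlt : j < text.length
  · have hnm := findFromN_none_facts _ _ _ hfind j le_rfl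
    have hguard : ¬ (PySem.Chars.lower ((text.drop j).take 9) = pvClose) := by
      rw [lower_take_drop]
      intro hg
      exact hnm ((guard_iff _ _ 9 j (by decide) (by norm_num)).mp hg |> fun p => ⟨by simpa [length_lower] using p.1, p.2⟩)
    have hnext : findFromN (PySem.Chars.lower text) pvClose (j + 1) = none := by
      rw [← findFromN_step _ _ _ hnm]; exact hfind
    rw [altAux, dif_pos hlt, if_neg hguard]
    exact skip_none text (j + 1) hnext acc r
  · rw [altAux]; rw [dif_neg hlt]
termination_by text.length - j
decreasing_by omega

-- B in skip mode resumes normal mode right after the first closing tag.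
theorem skip_some (text : List Char) (e j : Nat)
    (hfind : findFromN (PySem.Chars.lower text) pvClose j = some e) (acc : List Char) (r : Int) :
    altAux text j true acc r = altAux text (e + 9) false acc r := by
  obtain ⟨hje, hfit, hpre⟩ := findFromN_some_facts _ _ _ _ hfind
  have hfit9 : e + 9 ≤ text.length := by
    have := length_lower text; simp [pvClose] at hfit; omega
  rcases Nat.eq_or_lt_of_le hje with rfl | hlt
  · have hg : PySem.Chars.lower ((text.drop j).take 9) = pvClose := by
      rw [lower_take_drop]
      exact (guard_iff _ _ 9 j (by decide) (by norm_num)).mpr ⟨by simpa [length_lower] using hfit9, hpre⟩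
    rw [altAux, dif_pos (show j < text.length by omega), if_pos rfl, if_pos hg]
  · have hnm := findFromN_min _ _ _ _ hfind j le_rfl hlt
    have hguard : ¬ (PySem.Chars.lower ((text.drop j).take 9) = pvClose) := by
      rw [lower_take_drop]
      intro hg
      exact hnm ((guard_iff _ _ 9 j (by decide) (by norm_num)).mp hg |> fun p => ⟨by simpa [length_lower] using p.1, p.2⟩)
    have hnext : findFromN (PySem.Chars.lower text) pvClose (j + 1) = some e := by
      rw [← findFromN_step _ _ _ hnm]; exact hfind
    rw [altAux, dif_pos (show j < text.length by omega), if_neg hguard]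
    exact skip_some text e (j + 1) hnext acc r
termination_by text.length - j
decreasing_by omega

-- B in normal mode with no opening tag ahead copies the rest verbatim.
theorem copy_none (text : List Char) (j : Nat)
    (hfind : findFromN (PySem.Chars.lower text) pvOpen j = none) (acc : List Char) (r : Int) :
    altAux text j false acc r = (acc ++ text.drop j, r) := by
  by_cases hlt : j < text.length
  · have hnm := findFromN_none_facts _ _ _ hfind j le_rfl
    have hguard : ¬ (PySem.Chars.lower ((text.drop j).take 7) = pvOpen) := by
      rw [lower_take_drop]
      intro hg
      exact hnm ((guard_iff _ _ 7 j (by decide) (by norm_num)).mp hg |> fun p => ⟨by simpa [length_lower] using p.1, p.2⟩)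
    have hnext : findFromN (PySem.Chars.lower text) pvOpen (j + 1) = none := by
      rw [← findFromN_step _ _ _ hnm]; exact hfind
    rw [altAux]
    simp only [dif_pos hlt, Bool.false_eq_true, if_false, if_neg hguard]
    rw [copy_none text (j + 1) hnext]
    rw [List.drop_eq_getElem_cons hlt]
    simp
  · rw [altAux, dif_neg hlt]
    rw [List.drop_eq_nil_of_le (by omega)]
    simp
termination_by text.length - j
decreasing_by omega

-- B in normal mode copies verbatim up to the first opening tag.
theorem copy_some (text : List Char) (s j : Nat)
    (hfind : findFromN (PySem.Chars.lower text) pvOpen j = some s) (acc : List Char) (r : Int) :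
    altAux text j false acc r =
      altAux text s false (acc ++ (text.drop j).take (s - j)) r := by
  obtain ⟨hjs, hfit, hpre⟩ := findFromN_some_facts _ _ _ _ hfind
  have hfit7 : s + 7 ≤ text.length := by
    have := length_lower text; simp [pvOpen] at hfit; omega
  rcases Nat.eq_or_lt_of_le hjs with rfl | hlt
  · simp
  · have hnm := findFromN_min _ _ _ _ hfind j le_rfl hlt
    have hguard : ¬ (PySem.Chars.lower ((text.drop j).take 7) = pvOpen) := by
      rw [lower_take_drop]
      intro hg
      exact hnm ((guard_iff _ _ 7 j (by decide) (by norm_num)).mp hg |> fun p => ⟨by simpa [length_lower] using p.1, p.2⟩)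
    have hnext : findFromN (PySem.Chars.lower text) pvOpen (j + 1) = some s := by
      rw [← findFromN_step _ _ _ hnm]; exact hfind
    have hjlt : j < text.length := by omega
    rw [altAux]
    simp only [dif_pos hjlt, Bool.false_eq_true, if_false, if_neg hguard]
    have hsj : s - j = (s - (j + 1)) + 1 := by omega
    have hacc : acc ++ (text.drop j).take (s - j) =
        (acc ++ (text.drop j).take 1) ++ (text.drop (j + 1)).take (s - (j + 1)) := by
      rw [List.append_assoc]
      congr 1
      rw [hsj, List.drop_eq_getElem_cons hjlt]
      rfl
    rw [copy_some text s (j + 1) hnext, ← hacc]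
termination_by text.length - j
decreasing_by omega

-- an opening tag at s blocks any closing tag before s + 7
theorem close_after_open (text : List Char) (s e : Nat)
    (hopen : pvOpen.isPrefixOf ((PySem.Chars.lower text).drop s) = true)
    (h : findFromN (PySem.Chars.lower text) pvClose s = some e) :
    findFromN (PySem.Chars.lower text) pvClose (s + 7) = some e := by
  rw [List.isPrefixOf_iff_prefix] at hopen
  obtain ⟨t, ht⟩ := hopen
  have hdrop : (PySem.Chars.lower text).drop s = '<'::'s'::'c'::'r'::'i'::'p'::'t'::t := by
    rw [← ht]; rfl
  have np : ∀ u, u < 7 → pvClose.isPrefixOf ((PySem.Chars.lower text).drop (s + u)) = false := by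
    intro u hu
    have hdu : (PySem.Chars.lower text).drop (s + u) = ((PySem.Chars.lower text).drop s).drop u := by
      rw [List.drop_drop]
    rw [hdu, hdrop]
    interval_cases u <;> simp [pvClose, List.isPrefixOf]
  have step : ∀ u, u < 7 → findFromN (PySem.Chars.lower text) pvClose (s + u)
      = findFromN (PySem.Chars.lower text) pvClose (s + u + 1) := by
    intro u hu
    exact findFromN_step _ _ _ (fun hc => by simp [np u hu] at hc)
  have key : ∀ d u, u + d = 7 → findFromN (PySem.Chars.lower text) pvClose (s + u)
      = findFromN (PySem.Chars.lower text) pvClose (s + 7) := by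
    intro d
    induction d with
    | zero => intro u hu; rw [show u = 7 by omega]
    | succ d ih =>
        intro u hu
        rw [step u (by omega)]
        have hnext := ih (u + 1) (by omega)
        rw [← Nat.add_assoc] at hnext
        exact hnext
  have h0 : findFromN (PySem.Chars.lower text) pvClose s
      = findFromN (PySem.Chars.lower text) pvClose (s + 7) := by
    simpa using key 7 0 (by omega)
  rw [← h0]; exact h

theorem main_loop (text : List Char) (i : Nat) (acc : List Char) (r : Int) :
    stripAuxA text (PySem.Chars.lower text) i acc r = altAux text i false acc r := by
  rw [stripAuxA]
  split
  · next hs =>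
      rw [copy_none text i hs]
  · next s hs =>
      obtain ⟨his, hfit, hpre⟩ := findFromN_some_facts _ _ _ _ hs
      have hfit7 : s + 7 ≤ text.length := by
        have := length_lower text; simp [pvOpen] at hfit; omega
      have hg : PySem.Chars.lower ((text.drop s).take 7) = pvOpen := by
        rw [lower_take_drop]
        exact (guard_iff _ _ 7 s (by decide) (by norm_num)).mpr ⟨by simpa [length_lower] using hfit7, hpre⟩
      rw [copy_some text s i hs]
      rw [altAux_open text s (by omega) hg]
      split
      · next he =>
          rw [skip_none text (s + 7) (findFromN_none_mono _ _ _ _ he (by omega))]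
      · next e he =>
          obtain ⟨hse, hfitc, hprec⟩ := findFromN_some_facts _ _ _ _ he
          have hfit9 : e + 9 ≤ text.length := by
            have := length_lower text; simp [pvClose] at hfitc; omega
          rw [skip_some text e (s + 7)
            (close_after_open text s e (by rw [List.isPrefixOf_iff_prefix]; exact List.isPrefixOf_iff_prefix.mp hpre) he)]
          exact main_loop text (e + 9) ((acc ++ (text.drop i).take (s - i)) ++ pvLabel) (r + 1)
termination_by text.length + 1 - i
decreasing_by
  have := length_lower text
  omega

-- ===== VERDICT (by name: the statement is the Claim_ definition above) =====
theorem strip_script_blocks_py_spec : Claim_equal_strip_script_blocks_py := by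
  intro text _
  unfold Spec_strip_script_blocks_py strip_script_blocks_py strip_script_blocks_py_alt
  simp only
  rw [main_loop text.toList 0 [] 0]
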